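-- pv_equiv track=rewrite | github.com/FelixSchladt/Yahtzee | src/rules.py | big_straight
-- ===== SOURCE A (Python) =====
-- def big_straight(throws: []) -> (bool, int):
--     '''This fuction checks whether the numbers in an array match a "big road".
--
--        :param throws: an array of numbers to be checked
--        :returns: whether the rule was fullfilled as well as the potential score
--     '''
--     score: int = 0
--     is_rule: bool = False
--
--     for i in (1, 2):
--         if i in throws\
--         and i+1 in throws\
--         and i+2 in throws\
--         and i+3 in throws\
--         and i+4 in throws:
--             score = 40
--             is_rule = True
--             break
--
--     return (is_rule, score)
-- ===== SOURCE B (Python) =====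
-- def big_straight(throws: []) -> (bool, int):
--     mask = 0
--     for v in throws:
--         if 1 <= v <= 6:
--             mask |= 1 << v
--     is_rule = (mask & 62) == 62 or (mask & 124) == 124
--     return (is_rule, 40 if is_rule else 0)
-- ===== Notes on version B (the rewrite author's own statement) =====
-- stated objective: alternative
-- what changed: Replaces A's loop over the two straight starts with ten chained list-membership scans by a single pass that accumulates a bitmask of seen faces 1..6, then decides the rule with two bitwise-AND tests (62 = faces 1-5, 124 = faces 2-6).
import Mathlib
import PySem

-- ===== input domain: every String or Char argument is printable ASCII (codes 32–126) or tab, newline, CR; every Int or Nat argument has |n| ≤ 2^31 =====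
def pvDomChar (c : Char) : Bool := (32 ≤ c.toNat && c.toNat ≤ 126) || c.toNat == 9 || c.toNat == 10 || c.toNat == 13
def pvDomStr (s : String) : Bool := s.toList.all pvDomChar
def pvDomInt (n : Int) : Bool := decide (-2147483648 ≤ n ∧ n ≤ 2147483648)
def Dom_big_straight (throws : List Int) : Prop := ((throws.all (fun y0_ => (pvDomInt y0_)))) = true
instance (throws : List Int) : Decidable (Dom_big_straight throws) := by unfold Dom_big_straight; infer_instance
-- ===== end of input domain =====

-- B makes a single pass accumulating a bitmask of the faces 1..6 seen, then decides the rule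
-- with two bitwise-AND tests, instead of A's loop with ten chained list-membership scans (objective: alternative).
-- ===== PORT A =====
def bsCheck (throws : List Int) (i : Int) : Bool :=
  throws.contains i && throws.contains (i+1) && throws.contains (i+2)
    && throws.contains (i+3) && throws.contains (i+4)

def bsLoop (throws : List Int) : List Int → Bool × Int
  | [] => (false, 0)
  | i :: rest => if bsCheck throws i then (true, 40) else bsLoop throws rest

def big_straight (throws : List Int) : Bool × Int :=
  bsLoop throws [1, 2]

-- ===== PORT B =====
-- step of Source B's loop: `if 1 <= v <= 6: mask |= 1 << v`
-- (the guard gives 1 ≤ v, so Python's `1 << v` is exactly `Int.shiftLeft 1 v.toNat`)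
def bsStep (mask : Int) (v : Int) : Int :=
  if 1 ≤ v ∧ v ≤ 6 then Int.lor mask (Int.shiftLeft 1 v.toNat) else mask

def big_straight_alt (throws : List Int) : Bool × Int :=
  let mask := throws.foldl bsStep 0
  let isRule := (Int.land mask 62 == 62) || (Int.land mask 124 == 124)
  (isRule, if isRule then 40 else 0)

-- ===== PRECONDITION & SPEC =====
def Spec_big_straight (throws : List Int) (out : Bool × Int) : Prop := out = big_straight_alt throws
instance (throws : List Int) (out : Bool × Int) : Decidable (Spec_big_straight throws out) := by unfold Spec_big_straight; infer_instance

-- ===== CLAIM (what is proved, stated in full; the proofs are below) =====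
def Claim_equal_big_straight : Prop := ∀ (throws : List Int), Dom_big_straight throws → Spec_big_straight throws (big_straight throws)

-- ===== LEMMAS AND PROOFS =====

-- the mask as a function of which faces 1..6 have been seen
def bsMaskOf (b1 b2 b3 b4 b5 b6 : Bool) : Int :=
  (if b1 then 2 else 0) + (if b2 then 4 else 0) + (if b3 then 8 else 0)
    + (if b4 then 16 else 0) + (if b5 then 32 else 0) + (if b6 then 64 else 0)

theorem bsStep_maskOf (b1 b2 b3 b4 b5 b6 : Bool) (x : Int) :
    bsStep (bsMaskOf b1 b2 b3 b4 b5 b6) x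
      = bsMaskOf (b1 || x == 1) (b2 || x == 2) (b3 || x == 3)
          (b4 || x == 4) (b5 || x == 5) (b6 || x == 6) := by
  by_cases hx : 1 ≤ x ∧ x ≤ 6
  · obtain ⟨hl, hr⟩ := hx
    interval_cases x <;>
      cases b1 <;> cases b2 <;> cases b3 <;> cases b4 <;> cases b5 <;> cases b6 <;> decide
  · have h1 : (x == 1) = false := by simp; omega
    have h2 : (x == 2) = false := by simp; omega
    have h3 : (x == 3) = false := by simp; omega
    have h4 : (x == 4) = false := by simp; omega
    have h5 : (x == 5) = false := by simp; omega
    have h6 : (x == 6) = false := by simp; omega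
    simp [bsStep, hx, h1, h2, h3, h4, h5, h6]

theorem bsFold_maskOf (l : List Int) : ∀ (b1 b2 b3 b4 b5 b6 : Bool),
    l.foldl bsStep (bsMaskOf b1 b2 b3 b4 b5 b6)
      = bsMaskOf (b1 || l.contains 1) (b2 || l.contains 2) (b3 || l.contains 3)
          (b4 || l.contains 4) (b5 || l.contains 5) (b6 || l.contains 6) := by
  induction l with
  | nil => intro b1 b2 b3 b4 b5 b6; simp [bsMaskOf]
  | cons x t ih =>
    intro b1 b2 b3 b4 b5 b6
    simp only [List.foldl_cons, bsStep_maskOf, ih]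
    have hc : ∀ (v : Int), (x :: t).contains v = ((x == v) || t.contains v) := by
      intro v; simp [beq_eq_decide]
      rw [show (decide (v = x)) = (decide (x = v)) from by by_cases h : v = x <;> simp [h, Ne.symm]]
    simp only [hc, Bool.or_assoc]

-- ===== VERDICT (by name: the statement is the Claim_ definition above) =====
theorem big_straight_spec : Claim_equal_big_straight := by
  intro throws _
  have hmask : throws.foldl bsStep 0
      = bsMaskOf (throws.contains 1) (throws.contains 2) (throws.contains 3)
          (throws.contains 4) (throws.contains 5) (throws.contains 6) := by
    have h0 : (0 : Int) = bsMaskOf false false false false false false := by decide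
    rw [h0, bsFold_maskOf]; simp
  simp only [Spec_big_straight, big_straight, big_straight_alt, bsLoop, bsCheck, hmask]
  by_cases h1 : (1 : Int) ∈ throws <;> by_cases h2 : (2 : Int) ∈ throws <;>
    by_cases h3 : (3 : Int) ∈ throws <;> by_cases h4 : (4 : Int) ∈ throws <;>
    by_cases h5 : (5 : Int) ∈ throws <;> by_cases h6 : (6 : Int) ∈ throws <;>
  norm_num [h1, h2, h3, h4, h5, h6, bsMaskOf] <;> decide
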